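-- pv_equiv track=rewrite | github.com/mvarukha/case10 | role2.py | pick_best_category
-- ===== SOURCE A (Python) =====
-- def pick_best_category(category_scores: dict) -> str:
--     """
--     Select the best category from scored categories using priority rules.
--
--     Args:
--         category_scores: Dictionary with category names as keys and scores as values.
--
--     Returns:
--         String representing the selected category name.
--     """
--     priority_order = [
--         "finance", "health", "home_services", "education",
--         "transport", "food", "subscriptions", "auto"
--     ]
--
--     best_score = max(category_scores.values())
--
--     top_candidates = [
--         category for category, score in category_scores.items()
--         if score == best_score
--     ]
--
--     if len(top_candidates) == 1:
--         return top_candidates[0]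
--
--     for important_category in priority_order:
--         if important_category in top_candidates:
--             return important_category
--
--     return top_candidates[0]
-- ===== SOURCE B (Python) =====
-- def pick_best_category(category_scores: dict) -> str:
--     priority_order = [
--         "finance", "health", "home_services", "education",
--         "transport", "food", "subscriptions", "auto"
--     ]
--     rank = {c: i for i, c in enumerate(priority_order)}
--     best, _ = max(category_scores.items(),
--                   key=lambda item: (item[1], -rank.get(item[0], len(priority_order))))
--     return best
-- ===== Notes on version B (the rewrite author's own statement) =====
-- stated objective: alternative
-- what changed: A computes the max score, builds the list of tied candidates, special-cases a single candidate and then loops over the priority list testing membership; B makes one max() call over the dict items with the lexicographic key (score, -priority_rank), so the filter pass, the length-1 branch and the priority loop all disappear.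
import Mathlib
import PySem

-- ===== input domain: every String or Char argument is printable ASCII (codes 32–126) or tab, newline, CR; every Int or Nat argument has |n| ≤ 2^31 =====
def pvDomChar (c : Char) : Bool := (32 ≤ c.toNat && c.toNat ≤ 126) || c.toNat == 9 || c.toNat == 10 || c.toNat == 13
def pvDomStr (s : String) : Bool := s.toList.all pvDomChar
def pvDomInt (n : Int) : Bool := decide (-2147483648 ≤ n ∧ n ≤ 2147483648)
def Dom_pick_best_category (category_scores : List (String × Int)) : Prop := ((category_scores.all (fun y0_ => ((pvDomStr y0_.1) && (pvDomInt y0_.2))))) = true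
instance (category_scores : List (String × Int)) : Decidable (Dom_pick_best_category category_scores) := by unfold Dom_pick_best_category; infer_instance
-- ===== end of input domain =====

-- B replaces A's staged computation (max score, tied-candidate list, length-1 branch, loop over
-- the priority list) by ONE max-pass over the dict items under the lexicographic key
-- (score, -priority_rank); objective: alternative (same cost, different algorithm shape).


-- ===== PORT A =====
def pvPriority : List String :=
  ["finance", "health", "home_services", "education",
   "transport", "food", "subscriptions", "auto"]

-- the dict parameter arrives as an association list; PySem.Dict.ofList is Python's dict construction
def pick_best_category (category_scores : List (String × Int)) : String :=
  let items := (PySem.Dict.ofList category_scores).items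
  let best_score := (PySem.List.max? (items.map (fun p => p.2)) (fun x => x)).getD 0
  let top_candidates := (items.filter (fun p => p.2 == best_score)).map (fun p => p.1)
  if top_candidates.length == 1 then top_candidates.headD ""
  else
    match pvPriority.find? (fun c => top_candidates.contains c) with
    | some c => c
    | none => top_candidates.headD ""

-- ===== PORT B =====
-- rank = {c: i for i, c in enumerate(priority_order)}
def pvRank : PySem.Dict String Int :=
  PySem.Dict.ofList (pvPriority.zipIdx.map (fun p => (p.1, (p.2 : Int))))

-- rank.get(c, len(priority_order))
def pvRankOf (c : String) : Int := pvRank.getD c (PySem.List.len pvPriority)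

-- best, _ = max(items, key=lambda item: (item[1], -rank.get(item[0], 8)))
def pick_best_category_alt (category_scores : List (String × Int)) : String :=
  match PySem.List.max2? (PySem.Dict.ofList category_scores).items
      (fun item => item.2) (fun item => -(pvRankOf item.1)) with
  | some best => best.1
  | none => ""   -- Python's max raises ValueError here (empty dict, outside Pre_)

-- ===== PRECONDITION & SPEC =====
-- Pre_ excludes only the empty dict, on which Python A (and B) raises ValueError (max of an empty sequence).
def Pre_pick_best_category (category_scores : List (String × Int)) : Prop :=
  category_scores ≠ []
instance (category_scores : List (String × Int)) : Decidable (Pre_pick_best_category category_scores) := by unfold Pre_pick_best_category; infer_instance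

def pvWitness_pick_best_category : (List (String × Int)) := [("food", 3), ("auto", 3)]

def Spec_pick_best_category (category_scores : List (String × Int)) (out : String) : Prop := out = pick_best_category_alt category_scores
instance (category_scores : List (String × Int)) (out : String) : Decidable (Spec_pick_best_category category_scores out) := by unfold Spec_pick_best_category; infer_instance

-- ===== CLAIM (what is proved, stated in full; the proofs are below) =====
def Claim_equal_pick_best_category : Prop := ∀ (category_scores : List (String × Int)), Dom_pick_best_category category_scores → Pre_pick_best_category category_scores → Spec_pick_best_category category_scores (pick_best_category category_scores)

-- ===== LEMMAS AND PROOFS =====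

-- the fold step of Python's max with the tuple key (score, -rank), named for the proofs
def pvStep2 (acc : Option (String × Int)) (x : String × Int) : Option (String × Int) :=
  match acc with
  | none => some x
  | some m =>
    if (decide (m.2 < x.2) || (!decide (x.2 < m.2) && decide (-(pvRankOf m.1) < -(pvRankOf x.1)))) = true
    then some x else some m

-- the fold step of min over items keyed by rank of the name
def pvStepMinP (acc : Option (String × Int)) (c : String × Int) : Option (String × Int) :=
  match acc with
  | none => some c
  | some m => if pvRankOf c.1 < pvRankOf m.1 then some c else some m

lemma max2?_foldl (l : List (String × Int)) :
    PySem.List.max2? l (fun item => item.2) (fun item => -(pvRankOf item.1)) =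
      List.foldl pvStep2 none l := by
  unfold PySem.List.max2?
  congr 1
  funext acc x
  cases acc <;> rfl

lemma min?P_foldl (l : List (String × Int)) :
    PySem.List.min? l (fun p => pvRankOf p.1) = List.foldl pvStepMinP none l := by
  unfold PySem.List.min?
  congr 1
  funext acc x
  cases acc <;> rfl

-- once the running element has the maximal score M, the max-pass on the rest behaves exactly
-- like the min-by-rank pass over the score-M elements of the rest
lemma step2_eq_min_of_top (M : Int) (t : List (String × Int)) :
    ∀ m : String × Int, (∀ p ∈ t, p.2 ≤ M) → m.2 = M →
    List.foldl pvStep2 (some m) t =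
      List.foldl pvStepMinP (some m) (t.filter (fun p => p.2 == M)) := by
  induction t with
  | nil => intro m _ _; rfl
  | cons x t ih =>
    intro m hle hm
    by_cases hx : x.2 = M
    · have hfil : (x :: t).filter (fun p => p.2 == M) = x :: t.filter (fun p => p.2 == M) := by
        simp [List.filter_cons, hx]
      have hstep : pvStep2 (some m) x = pvStepMinP (some m) x := by
        unfold pvStep2 pvStepMinP
        have h1 : decide (m.2 < x.2) = false := by simp [hm, hx]
        have h2 : decide (x.2 < m.2) = false := by simp [hm, hx]
        simp only [h1, h2, Bool.false_or, Bool.not_false, Bool.true_and]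
        by_cases hr : pvRankOf x.1 < pvRankOf m.1
        · have : (-(pvRankOf m.1) < -(pvRankOf x.1)) := by omega
          simp [hr, this]
        · have : ¬(-(pvRankOf m.1) < -(pvRankOf x.1)) := by omega
          simp [hr, this]
      rw [hfil, List.foldl_cons, List.foldl_cons, hstep]
      have hnext : pvStepMinP (some m) x = some x ∨ pvStepMinP (some m) x = some m := by
        by_cases h : pvRankOf x.1 < pvRankOf m.1
        · left; simp [pvStepMinP, h]
        · right; simp [pvStepMinP, h]
      rcases hnext with h | h <;> rw [h] <;>
        exact ih _ (fun p hp => hle p (List.mem_cons_of_mem _ hp)) (by simp [hx, hm])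
    · have hxlt : x.2 < m.2 := by
        have := hle x (List.mem_cons_self)
        omega
      have hfil : (x :: t).filter (fun p => p.2 == M) = t.filter (fun p => p.2 == M) := by
        simp [List.filter_cons, hx]
      have hstep : pvStep2 (some m) x = some m := by
        unfold pvStep2
        have h1 : decide (m.2 < x.2) = false := by simp; omega
        have h2 : decide (x.2 < m.2) = true := by simp [hxlt]
        simp [h1, h2]
      rw [hfil, List.foldl_cons, hstep]
      exact ih m (fun p hp => hle p (List.mem_cons_of_mem _ hp)) hm

-- while the running element is below M but an M-scored element is still ahead,
-- the max-pass catches up with the min-by-rank pass started from empty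
lemma step2_eq_min_of_low (M : Int) (t : List (String × Int)) :
    ∀ m : String × Int, (∀ p ∈ t, p.2 ≤ M) → m.2 < M → (∃ p ∈ t, p.2 = M) →
    List.foldl pvStep2 (some m) t =
      List.foldl pvStepMinP none (t.filter (fun p => p.2 == M)) := by
  induction t with
  | nil => intro m _ _ hex; simp at hex
  | cons x t ih =>
    intro m hle hm hex
    by_cases hx : x.2 = M
    · have hfil : (x :: t).filter (fun p => p.2 == M) = x :: t.filter (fun p => p.2 == M) := by
        simp [List.filter_cons, hx]
      have hstep : pvStep2 (some m) x = some x := by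
        unfold pvStep2
        have h1 : decide (m.2 < x.2) = true := by simp [hx]; omega
        simp [h1]
      rw [hfil, List.foldl_cons, List.foldl_cons, hstep]
      show List.foldl pvStep2 (some x) t = List.foldl pvStepMinP (some x) (t.filter (fun p => p.2 == M))
      exact step2_eq_min_of_top M t x (fun p hp => hle p (List.mem_cons_of_mem _ hp)) hx
    · have hfil : (x :: t).filter (fun p => p.2 == M) = t.filter (fun p => p.2 == M) := by
        simp [List.filter_cons, hx]
      have hxlt : x.2 < M := by
        have := hle x (List.mem_cons_self)
        omega
      have hex' : ∃ p ∈ t, p.2 = M := by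
        rcases hex with ⟨p, hp, hpM⟩
        rcases List.mem_cons.mp hp with rfl | hp'
        · exact absurd hpM hx
        · exact ⟨p, hp', hpM⟩
      have hnext : pvStep2 (some m) x = some x ∨ pvStep2 (some m) x = some m := by
        by_cases h : (decide (m.2 < x.2) || (!decide (x.2 < m.2) && decide (-(pvRankOf m.1) < -(pvRankOf x.1)))) = true
        · left; simp only [pvStep2, h, if_pos]
        · right; simp only [pvStep2, h, if_neg, Bool.false_eq_true, not_false_iff, if_false]
      rw [hfil, List.foldl_cons]
      rcases hnext with h | h <;> rw [h]
      · exact ih x (fun p hp => hle p (List.mem_cons_of_mem _ hp)) hxlt hex'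
      · exact ih m (fun p hp => hle p (List.mem_cons_of_mem _ hp)) hm hex'

-- the one-pass lexicographic max IS min-by-rank over the elements holding the max score
lemma max2_eq_min_filter (items : List (String × Int)) (M : Int)
    (hle : ∀ p ∈ items, p.2 ≤ M) (hex : ∃ p ∈ items, p.2 = M) :
    PySem.List.max2? items (fun item => item.2) (fun item => -(pvRankOf item.1)) =
      PySem.List.min? (items.filter (fun p => p.2 == M)) (fun p => pvRankOf p.1) := by
  rw [max2?_foldl, min?P_foldl]
  cases items with
  | nil => simp at hex
  | cons x t =>
    rw [List.foldl_cons]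
    show List.foldl pvStep2 (some x) t = _
    by_cases hx : x.2 = M
    · have hfil : (x :: t).filter (fun p => p.2 == M) = x :: t.filter (fun p => p.2 == M) := by
        simp [List.filter_cons, hx]
      rw [hfil, List.foldl_cons]
      show _ = List.foldl pvStepMinP (some x) (t.filter (fun p => p.2 == M))
      exact step2_eq_min_of_top M t x (fun p hp => hle p (List.mem_cons_of_mem _ hp)) hx
    · have hfil : (x :: t).filter (fun p => p.2 == M) = t.filter (fun p => p.2 == M) := by
        simp [List.filter_cons, hx]
      have hxlt : x.2 < M := by
        have := hle x (List.mem_cons_self)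
        omega
      have hex' : ∃ p ∈ t, p.2 = M := by
        rcases hex with ⟨p, hp, hpM⟩
        rcases List.mem_cons.mp hp with rfl | hp'
        · exact absurd hpM hx
        · exact ⟨p, hp', hpM⟩
      rw [hfil]
      exact step2_eq_min_of_low M t x (fun p hp => hle p (List.mem_cons_of_mem _ hp)) hxlt hex'

-- min by rank commutes with projecting the names (the key only looks at the name)
lemma min?_map_fst_aux (l : List (String × Int)) :
    ∀ acc : Option (String × Int),
    List.foldl
      (fun a c => match a with
        | none => some c
        | some m => if pvRankOf c < pvRankOf m then some c else some m)
      (acc.map Prod.fst) (l.map Prod.fst)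
    = (List.foldl pvStepMinP acc l).map Prod.fst := by
  induction l with
  | nil => intro acc; rfl
  | cons x t ih =>
    intro acc
    rw [List.map_cons, List.foldl_cons, List.foldl_cons]
    cases acc with
    | none =>
      show List.foldl _ ((some x).map Prod.fst) (t.map Prod.fst) = _
      exact ih (some x)
    | some m =>
      show List.foldl _ (if pvRankOf x.1 < pvRankOf m.1 then some x.1 else some m.1) (t.map Prod.fst)
        = (List.foldl pvStepMinP (pvStepMinP (some m) x) t).map Prod.fst
      unfold pvStepMinP
      by_cases h : pvRankOf x.1 < pvRankOf m.1
      · simp only [h, if_pos]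
        exact ih (some x)
      · simp only [h, if_neg, if_false]
        exact ih (some m)

lemma min?_map_fst (l : List (String × Int)) :
    PySem.List.min? (l.map Prod.fst) (fun c => pvRankOf c) =
      (PySem.List.min? l (fun p => pvRankOf p.1)).map Prod.fst := by
  have h := min?_map_fst_aux l none
  simp only [Option.map_none] at h
  rw [min?P_foldl, ← h]
  unfold PySem.List.min?
  congr 1
  funext a c
  cases a <;> rfl

-- the rank dict, unfolded: position in the priority list, 8 (= its length) for anything else
lemma rank_eq (c : String) :
    pvRankOf c =
      if "finance" = c then 0 else if "health" = c then 1
      else if "home_services" = c then 2 else if "education" = c then 3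
      else if "transport" = c then 4 else if "food" = c then 5
      else if "subscriptions" = c then 6 else if "auto" = c then 7 else 8 := by
  have h : pvRank = PySem.Dict.mk
      [("finance", 0), ("health", 1), ("home_services", 2), ("education", 3),
       ("transport", 4), ("food", 5), ("subscriptions", 6), ("auto", 7)] := by decide
  unfold pvRankOf
  rw [h]
  simp only [PySem.Dict.getD_eq_get?_getD, PySem.Dict.get?_mk_cons]
  by_cases h0 : "finance" = c <;> by_cases h1 : "health" = c <;>
    by_cases h2 : "home_services" = c <;> by_cases h3 : "education" = c <;>
    by_cases h4 : "transport" = c <;> by_cases h5 : "food" = c <;>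
    by_cases h6 : "subscriptions" = c <;> by_cases h7 : "auto" = c <;>
    simp_all [PySem.List.len, pvPriority] <;> rfl

-- Python's min keeps the first extremum: with a unique minimiser the result is forced
lemma min?_of_unique {xs : List String} {r : String → Int} {m : String}
    (hne : xs ≠ []) (hm : m ∈ xs) (hmin : ∀ y ∈ xs, r m ≤ r y)
    (huniq : ∀ y ∈ xs, r y = r m → y = m) :
    PySem.List.min? xs r = some m := by
  cases h : PySem.List.min? xs r with
  | none => exact absurd ((PySem.List.min?_eq_none_iff xs r).mp h) hne
  | some m' =>
    have hmem := PySem.List.min?_mem h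
    have h1 := PySem.List.min?_isMin h m hm
    have h2 := hmin m' hmem
    exact congrArg some (huniq m' hmem (le_antisymm h1 h2))

-- with a constant key Python's min returns the first element
lemma min?_const {r : String → Int} (x : String) (t : List String)
    (h : ∀ y ∈ x :: t, r y = r x) :
    PySem.List.min? (x :: t) r = some x := by
  induction t generalizing x with
  | nil => rfl
  | cons y t ih =>
    have hstep : PySem.List.min? (x :: y :: t) r = PySem.List.min? (x :: t) r := by
      unfold PySem.List.min?
      simp only [List.foldl_cons]
      congr 1
      show (if r y < r x then some y else some x) = some x
      rw [h y (by simp)]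
      simp
    rw [hstep]
    exact ih x (fun z hz => by
      rcases List.mem_cons.mp hz with rfl | hz
      · exact h z (by simp)
      · exact h z (by simp [hz]))

-- the heart of the equivalence: on any nonempty candidate list, A's selection (length-1 branch,
-- then the priority loop, then the fallback) equals the first-minimum by rank
set_option maxHeartbeats 1000000 in
lemma select_eq (x : String) (t : List String) :
    (if (x :: t).length == 1 then (x :: t).headD ""
     else
       match pvPriority.find? (fun c => (x :: t).contains c) with
       | some c => c
       | none => (x :: t).headD "") =
    (PySem.List.min? (x :: t) (fun c => pvRankOf c)).getD "" := by
  by_cases hlen : t = []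
  · subst hlen
    simp [PySem.List.min?]
  · have hlen2 : ((x :: t).length == 1) = false := by
      cases t with
      | nil => exact absurd rfl hlen
      | cons a s => simp
    rw [hlen2]
    simp only [Bool.false_eq_true, if_false]
    by_cases h0 : "finance" ∈ x :: t
    · have hfind : pvPriority.find? (fun c => (x :: t).contains c) = some "finance" := by
        rw [pvPriority]
        rw [List.find?_cons_of_pos (by simpa using h0)]
      have hrP : pvRankOf "finance" = (0 : Int) := by decide
      have hmin : PySem.List.min? (x :: t) (fun c => pvRankOf c) = some "finance" := by
        apply min?_of_unique (List.cons_ne_nil x t) h0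
        · intro y hy
          rw [hrP]
          simp only [rank_eq]
          (try split_ifs) <;> omega
        · intro y hy heq
          rw [hrP] at heq
          by_cases nk : "finance" = y
          · exact nk.symm
          simp only [rank_eq, if_neg nk] at heq
          (try split_ifs at heq) <;> omega
      rw [hfind, hmin]
      rfl
    · by_cases h1 : "health" ∈ x :: t
      · have hfind : pvPriority.find? (fun c => (x :: t).contains c) = some "health" := by
          rw [pvPriority]
          rw [List.find?_cons_of_neg (by simpa using h0), List.find?_cons_of_pos (by simpa using h1)]
        have hrP : pvRankOf "health" = (1 : Int) := by decide
        have hmin : PySem.List.min? (x :: t) (fun c => pvRankOf c) = some "health" := by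
          apply min?_of_unique (List.cons_ne_nil x t) h1
          · intro y hy
            rw [hrP]
            have n0 : ¬("finance" = y) := by rintro rfl; exact h0 hy
            simp only [rank_eq, if_neg n0]
            (try split_ifs) <;> omega
          · intro y hy heq
            rw [hrP] at heq
            have n0 : ¬("finance" = y) := by rintro rfl; exact h0 hy
            by_cases nk : "health" = y
            · exact nk.symm
            simp only [rank_eq, if_neg n0, if_neg nk] at heq
            (try split_ifs at heq) <;> omega
        rw [hfind, hmin]
        rfl
      · by_cases h2 : "home_services" ∈ x :: t
        · have hfind : pvPriority.find? (fun c => (x :: t).contains c) = some "home_services" := by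
            rw [pvPriority]
            rw [List.find?_cons_of_neg (by simpa using h0), List.find?_cons_of_neg (by simpa using h1), List.find?_cons_of_pos (by simpa using h2)]
          have hrP : pvRankOf "home_services" = (2 : Int) := by decide
          have hmin : PySem.List.min? (x :: t) (fun c => pvRankOf c) = some "home_services" := by
            apply min?_of_unique (List.cons_ne_nil x t) h2
            · intro y hy
              rw [hrP]
              have n0 : ¬("finance" = y) := by rintro rfl; exact h0 hy
              have n1 : ¬("health" = y) := by rintro rfl; exact h1 hy
              simp only [rank_eq, if_neg n0, if_neg n1]
              (try split_ifs) <;> omega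
            · intro y hy heq
              rw [hrP] at heq
              have n0 : ¬("finance" = y) := by rintro rfl; exact h0 hy
              have n1 : ¬("health" = y) := by rintro rfl; exact h1 hy
              by_cases nk : "home_services" = y
              · exact nk.symm
              simp only [rank_eq, if_neg n0, if_neg n1, if_neg nk] at heq
              (try split_ifs at heq) <;> omega
          rw [hfind, hmin]
          rfl
        · by_cases h3 : "education" ∈ x :: t
          · have hfind : pvPriority.find? (fun c => (x :: t).contains c) = some "education" := by
              rw [pvPriority]
              rw [List.find?_cons_of_neg (by simpa using h0), List.find?_cons_of_neg (by simpa using h1), List.find?_cons_of_neg (by simpa using h2), List.find?_cons_of_pos (by simpa using h3)]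
            have hrP : pvRankOf "education" = (3 : Int) := by decide
            have hmin : PySem.List.min? (x :: t) (fun c => pvRankOf c) = some "education" := by
              apply min?_of_unique (List.cons_ne_nil x t) h3
              · intro y hy
                rw [hrP]
                have n0 : ¬("finance" = y) := by rintro rfl; exact h0 hy
                have n1 : ¬("health" = y) := by rintro rfl; exact h1 hy
                have n2 : ¬("home_services" = y) := by rintro rfl; exact h2 hy
                simp only [rank_eq, if_neg n0, if_neg n1, if_neg n2]
                (try split_ifs) <;> omega
              · intro y hy heq
                rw [hrP] at heq
                have n0 : ¬("finance" = y) := by rintro rfl; exact h0 hy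
                have n1 : ¬("health" = y) := by rintro rfl; exact h1 hy
                have n2 : ¬("home_services" = y) := by rintro rfl; exact h2 hy
                by_cases nk : "education" = y
                · exact nk.symm
                simp only [rank_eq, if_neg n0, if_neg n1, if_neg n2, if_neg nk] at heq
                (try split_ifs at heq) <;> omega
            rw [hfind, hmin]
            rfl
          · by_cases h4 : "transport" ∈ x :: t
            · have hfind : pvPriority.find? (fun c => (x :: t).contains c) = some "transport" := by
                rw [pvPriority]
                rw [List.find?_cons_of_neg (by simpa using h0), List.find?_cons_of_neg (by simpa using h1), List.find?_cons_of_neg (by simpa using h2), List.find?_cons_of_neg (by simpa using h3), List.find?_cons_of_pos (by simpa using h4)]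
              have hrP : pvRankOf "transport" = (4 : Int) := by decide
              have hmin : PySem.List.min? (x :: t) (fun c => pvRankOf c) = some "transport" := by
                apply min?_of_unique (List.cons_ne_nil x t) h4
                · intro y hy
                  rw [hrP]
                  have n0 : ¬("finance" = y) := by rintro rfl; exact h0 hy
                  have n1 : ¬("health" = y) := by rintro rfl; exact h1 hy
                  have n2 : ¬("home_services" = y) := by rintro rfl; exact h2 hy
                  have n3 : ¬("education" = y) := by rintro rfl; exact h3 hy
                  simp only [rank_eq, if_neg n0, if_neg n1, if_neg n2, if_neg n3]
                  (try split_ifs) <;> omega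
                · intro y hy heq
                  rw [hrP] at heq
                  have n0 : ¬("finance" = y) := by rintro rfl; exact h0 hy
                  have n1 : ¬("health" = y) := by rintro rfl; exact h1 hy
                  have n2 : ¬("home_services" = y) := by rintro rfl; exact h2 hy
                  have n3 : ¬("education" = y) := by rintro rfl; exact h3 hy
                  by_cases nk : "transport" = y
                  · exact nk.symm
                  simp only [rank_eq, if_neg n0, if_neg n1, if_neg n2, if_neg n3, if_neg nk] at heq
                  (try split_ifs at heq) <;> omega
              rw [hfind, hmin]
              rfl
            · by_cases h5 : "food" ∈ x :: t
              · have hfind : pvPriority.find? (fun c => (x :: t).contains c) = some "food" := by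
                  rw [pvPriority]
                  rw [List.find?_cons_of_neg (by simpa using h0), List.find?_cons_of_neg (by simpa using h1), List.find?_cons_of_neg (by simpa using h2), List.find?_cons_of_neg (by simpa using h3), List.find?_cons_of_neg (by simpa using h4), List.find?_cons_of_pos (by simpa using h5)]
                have hrP : pvRankOf "food" = (5 : Int) := by decide
                have hmin : PySem.List.min? (x :: t) (fun c => pvRankOf c) = some "food" := by
                  apply min?_of_unique (List.cons_ne_nil x t) h5
                  · intro y hy
                    rw [hrP]
                    have n0 : ¬("finance" = y) := by rintro rfl; exact h0 hy
                    have n1 : ¬("health" = y) := by rintro rfl; exact h1 hy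
                    have n2 : ¬("home_services" = y) := by rintro rfl; exact h2 hy
                    have n3 : ¬("education" = y) := by rintro rfl; exact h3 hy
                    have n4 : ¬("transport" = y) := by rintro rfl; exact h4 hy
                    simp only [rank_eq, if_neg n0, if_neg n1, if_neg n2, if_neg n3, if_neg n4]
                    (try split_ifs) <;> omega
                  · intro y hy heq
                    rw [hrP] at heq
                    have n0 : ¬("finance" = y) := by rintro rfl; exact h0 hy
                    have n1 : ¬("health" = y) := by rintro rfl; exact h1 hy
                    have n2 : ¬("home_services" = y) := by rintro rfl; exact h2 hy
                    have n3 : ¬("education" = y) := by rintro rfl; exact h3 hy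
                    have n4 : ¬("transport" = y) := by rintro rfl; exact h4 hy
                    by_cases nk : "food" = y
                    · exact nk.symm
                    simp only [rank_eq, if_neg n0, if_neg n1, if_neg n2, if_neg n3, if_neg n4, if_neg nk] at heq
                    (try split_ifs at heq) <;> omega
                rw [hfind, hmin]
                rfl
              · by_cases h6 : "subscriptions" ∈ x :: t
                · have hfind : pvPriority.find? (fun c => (x :: t).contains c) = some "subscriptions" := by
                    rw [pvPriority]
                    rw [List.find?_cons_of_neg (by simpa using h0), List.find?_cons_of_neg (by simpa using h1), List.find?_cons_of_neg (by simpa using h2), List.find?_cons_of_neg (by simpa using h3), List.find?_cons_of_neg (by simpa using h4), List.find?_cons_of_neg (by simpa using h5), List.find?_cons_of_pos (by simpa using h6)]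
                  have hrP : pvRankOf "subscriptions" = (6 : Int) := by decide
                  have hmin : PySem.List.min? (x :: t) (fun c => pvRankOf c) = some "subscriptions" := by
                    apply min?_of_unique (List.cons_ne_nil x t) h6
                    · intro y hy
                      rw [hrP]
                      have n0 : ¬("finance" = y) := by rintro rfl; exact h0 hy
                      have n1 : ¬("health" = y) := by rintro rfl; exact h1 hy
                      have n2 : ¬("home_services" = y) := by rintro rfl; exact h2 hy
                      have n3 : ¬("education" = y) := by rintro rfl; exact h3 hy
                      have n4 : ¬("transport" = y) := by rintro rfl; exact h4 hy
                      have n5 : ¬("food" = y) := by rintro rfl; exact h5 hy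
                      simp only [rank_eq, if_neg n0, if_neg n1, if_neg n2, if_neg n3, if_neg n4, if_neg n5]
                      (try split_ifs) <;> omega
                    · intro y hy heq
                      rw [hrP] at heq
                      have n0 : ¬("finance" = y) := by rintro rfl; exact h0 hy
                      have n1 : ¬("health" = y) := by rintro rfl; exact h1 hy
                      have n2 : ¬("home_services" = y) := by rintro rfl; exact h2 hy
                      have n3 : ¬("education" = y) := by rintro rfl; exact h3 hy
                      have n4 : ¬("transport" = y) := by rintro rfl; exact h4 hy
                      have n5 : ¬("food" = y) := by rintro rfl; exact h5 hy
                      by_cases nk : "subscriptions" = y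
                      · exact nk.symm
                      simp only [rank_eq, if_neg n0, if_neg n1, if_neg n2, if_neg n3, if_neg n4, if_neg n5, if_neg nk] at heq
                      (try split_ifs at heq) <;> omega
                  rw [hfind, hmin]
                  rfl
                · by_cases h7 : "auto" ∈ x :: t
                  · have hfind : pvPriority.find? (fun c => (x :: t).contains c) = some "auto" := by
                      rw [pvPriority]
                      rw [List.find?_cons_of_neg (by simpa using h0), List.find?_cons_of_neg (by simpa using h1), List.find?_cons_of_neg (by simpa using h2), List.find?_cons_of_neg (by simpa using h3), List.find?_cons_of_neg (by simpa using h4), List.find?_cons_of_neg (by simpa using h5), List.find?_cons_of_neg (by simpa using h6), List.find?_cons_of_pos (by simpa using h7)]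
                    have hrP : pvRankOf "auto" = (7 : Int) := by decide
                    have hmin : PySem.List.min? (x :: t) (fun c => pvRankOf c) = some "auto" := by
                      apply min?_of_unique (List.cons_ne_nil x t) h7
                      · intro y hy
                        rw [hrP]
                        have n0 : ¬("finance" = y) := by rintro rfl; exact h0 hy
                        have n1 : ¬("health" = y) := by rintro rfl; exact h1 hy
                        have n2 : ¬("home_services" = y) := by rintro rfl; exact h2 hy
                        have n3 : ¬("education" = y) := by rintro rfl; exact h3 hy
                        have n4 : ¬("transport" = y) := by rintro rfl; exact h4 hy
                        have n5 : ¬("food" = y) := by rintro rfl; exact h5 hy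
                        have n6 : ¬("subscriptions" = y) := by rintro rfl; exact h6 hy
                        simp only [rank_eq, if_neg n0, if_neg n1, if_neg n2, if_neg n3, if_neg n4, if_neg n5, if_neg n6]
                        (try split_ifs) <;> omega
                      · intro y hy heq
                        rw [hrP] at heq
                        have n0 : ¬("finance" = y) := by rintro rfl; exact h0 hy
                        have n1 : ¬("health" = y) := by rintro rfl; exact h1 hy
                        have n2 : ¬("home_services" = y) := by rintro rfl; exact h2 hy
                        have n3 : ¬("education" = y) := by rintro rfl; exact h3 hy
                        have n4 : ¬("transport" = y) := by rintro rfl; exact h4 hy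
                        have n5 : ¬("food" = y) := by rintro rfl; exact h5 hy
                        have n6 : ¬("subscriptions" = y) := by rintro rfl; exact h6 hy
                        by_cases nk : "auto" = y
                        · exact nk.symm
                        simp only [rank_eq, if_neg n0, if_neg n1, if_neg n2, if_neg n3, if_neg n4, if_neg n5, if_neg n6, if_neg nk] at heq
                        (try split_ifs at heq) <;> omega
                    rw [hfind, hmin]
                    rfl
                  · -- no priority category is among the candidates: both sides take the first candidate
                    have hfind : pvPriority.find? (fun c => (x :: t).contains c) = none := by
                      rw [List.find?_eq_none]
                      intro a ha
                      simp only [pvPriority, List.mem_cons, List.not_mem_nil, or_false] at ha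
                      rcases ha with rfl | rfl | rfl | rfl | rfl | rfl | rfl | rfl <;> simpa [h0, h1, h2, h3, h4, h5, h6, h7]
                    have h8 : ∀ y ∈ x :: t, pvRankOf y = 8 := by
                      intro y hy
                      have n0 : ¬("finance" = y) := by rintro rfl; exact h0 hy
                      have n1 : ¬("health" = y) := by rintro rfl; exact h1 hy
                      have n2 : ¬("home_services" = y) := by rintro rfl; exact h2 hy
                      have n3 : ¬("education" = y) := by rintro rfl; exact h3 hy
                      have n4 : ¬("transport" = y) := by rintro rfl; exact h4 hy
                      have n5 : ¬("food" = y) := by rintro rfl; exact h5 hy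
                      have n6 : ¬("subscriptions" = y) := by rintro rfl; exact h6 hy
                      have n7 : ¬("auto" = y) := by rintro rfl; exact h7 hy
                      simp only [rank_eq, if_neg n0, if_neg n1, if_neg n2, if_neg n3, if_neg n4, if_neg n5, if_neg n6, if_neg n7]
                    have hmin : PySem.List.min? (x :: t) (fun c => pvRankOf c) = some x := by
                      exact min?_const x t (fun y hy => by simp only [h8 y hy, h8 x (by simp)])
                    rw [hfind, hmin]
                    rfl

-- the dict built from a nonempty association list has at least one item
lemma items_ne_nil {cs : List (String × Int)} (h : cs ≠ []) :
    (PySem.Dict.ofList cs).items ≠ [] := by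
  obtain ⟨q, cs', rfl⟩ : ∃ q cs', cs = q :: cs' := by
    cases cs with
    | nil => exact absurd rfl h
    | cons q cs' => exact ⟨q, cs', rfl⟩
  have hk : (PySem.Dict.ofList (q :: cs')).keys =
      PySem.Set.update (PySem.Dict.empty : PySem.Dict String Int).keys ((q :: cs').map (fun p => p.1)) := by
    exact PySem.Dict.keys_foldl_insert_key (q :: cs') (fun p => p.1) (fun _ p => p.2) PySem.Dict.empty
  intro hnil
  have hkeys : (PySem.Dict.ofList (q :: cs')).keys = [] := by
    simp [PySem.Dict.keys, hnil]
  rw [hk] at hkeys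
  have hmem : q.1 ∈ PySem.Set.update (PySem.Dict.empty : PySem.Dict String Int).keys ((q :: cs').map (fun p => p.1)) := by
    rw [PySem.Set.mem_update]
    exact Or.inr (by simp)
  rw [hkeys] at hmem
  exact absurd hmem List.not_mem_nil

-- ===== VERDICT (by name: the statement is the Claim_ definition above) =====
theorem pick_best_category_spec : Claim_equal_pick_best_category := by
  intro cs _ hpre
  unfold Spec_pick_best_category pick_best_category pick_best_category_alt
  dsimp only
  have hitems := items_ne_nil hpre
  -- the max of a nonempty list of scores exists
  obtain ⟨M, hmx⟩ : ∃ M, PySem.List.max? ((PySem.Dict.ofList cs).items.map (fun p => p.2)) (fun x => x) = some M := by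
    cases hm : PySem.List.max? ((PySem.Dict.ofList cs).items.map (fun p => p.2)) (fun x => x) with
    | none =>
      have := (PySem.List.max?_eq_none_iff _ _).mp hm
      simp at this
      exact absurd this hitems
    | some M => exact ⟨M, rfl⟩
  have hle : ∀ p ∈ (PySem.Dict.ofList cs).items, p.2 ≤ M := by
    intro p hp
    exact PySem.List.max?_isMax hmx p.2 (List.mem_map.mpr ⟨p, hp, rfl⟩)
  have hex : ∃ p ∈ (PySem.Dict.ofList cs).items, p.2 = M := by
    have hmem := PySem.List.max?_mem hmx
    obtain ⟨p, hp, hpm⟩ := List.mem_map.mp hmem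
    exact ⟨p, hp, hpm⟩
  -- B's one-pass lexicographic max = min-by-rank over the score-M items
  rw [hmx]
  simp only [Option.getD_some]
  rw [max2_eq_min_filter _ M hle hex]
  -- the score-M items exist, so the candidate-name list is a cons
  obtain ⟨q, hq⟩ := hex
  have hfne : (PySem.Dict.ofList cs).items.filter (fun p => p.2 == M) ≠ [] := by
    intro hnil
    have : q ∈ (PySem.Dict.ofList cs).items.filter (fun p => p.2 == M) :=
      List.mem_filter.mpr ⟨hq.1, by simp [hq.2]⟩
    rw [hnil] at this
    exact absurd this List.not_mem_nil
  obtain ⟨x, t, hxt⟩ : ∃ x t, ((PySem.Dict.ofList cs).items.filter (fun p => p.2 == M)).map (fun p => p.1) = x :: t := by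
    cases hc : ((PySem.Dict.ofList cs).items.filter (fun p => p.2 == M)).map (fun p => p.1) with
    | nil => exact absurd (List.map_eq_nil_iff.mp hc) hfne
    | cons x t => exact ⟨x, t, rfl⟩
  -- A's branches = first-minimum by rank over the candidate names  (select_eq),
  -- and projecting names commutes with the min  (min?_map_fst)
  have hmap : ((PySem.Dict.ofList cs).items.filter (fun p => p.2 == M)).map (fun p => p.1) =
      ((PySem.Dict.ofList cs).items.filter (fun p => p.2 == M)).map Prod.fst := rfl
  have hchain := min?_map_fst ((PySem.Dict.ofList cs).items.filter (fun p => p.2 == M))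
  rw [← hmap, hxt] at hchain
  rw [hxt]
  rw [select_eq x t, hchain]
  cases PySem.List.min? ((PySem.Dict.ofList cs).items.filter (fun p => p.2 == M)) (fun p => pvRankOf p.1) with
  | none => rfl
  | some kv => rfl
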